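-- pv_equiv track=rewrite | github.com/nyckolas-python/hexlet.io | python_exam_1/exam_1.py | ichunks
-- ===== SOURCE A (Python) =====
-- import itertools
--
-- def ichunks(n, alist):
--     #new_list = [expression for member in iterable (if conditional)]
--     new_list = []
--     if type(alist) is list:  # проверяем тип входящиего -> список или итератор
--         new_list = map(lambda x: list(itertools.islice(alist, x, x + n)),
--                        itertools.count(0, n))
--         for i in new_list:  # если список то используем itertools.count(0, n) поток чисел с шагом n
--             if len(i) != n:
--                 return  # проверка хватает ли в чанке всех элементов для заданной длины
--             yield i
--     elif type(alist) is not list: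
--         new_list = map(lambda x: list(itertools.islice(alist, x, x + n)),
--                        itertools.repeat(0))
--         for i in new_list:  # если итератор то используем itertools.repeat(0) поток нулей
--             if len(i) != n:
--                 return  # проверка хватает ли в чанке всех элементов для заданной длины
--             yield i
-- ===== SOURCE B (Python) =====
-- def ichunks(n, alist):
--     # Closed-form chunk count: len//n full chunks exist; emit each by direct slicing.
--     xs = list(alist)
--     for k in range(len(xs) // n):
--         yield xs[k * n : (k + 1) * n]
-- ===== Notes on version B (the rewrite author's own statement) =====
-- stated objective: alternative
-- what changed: B replaces A's open-ended stream of trial slices with a short-chunk stop test (count(0,n)/repeat(0) driving islice until a chunk comes up short) by computing the exact number of full chunks len//n up front and emitting each chunk by direct index slicing, with no stop test at all.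
import Mathlib
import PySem

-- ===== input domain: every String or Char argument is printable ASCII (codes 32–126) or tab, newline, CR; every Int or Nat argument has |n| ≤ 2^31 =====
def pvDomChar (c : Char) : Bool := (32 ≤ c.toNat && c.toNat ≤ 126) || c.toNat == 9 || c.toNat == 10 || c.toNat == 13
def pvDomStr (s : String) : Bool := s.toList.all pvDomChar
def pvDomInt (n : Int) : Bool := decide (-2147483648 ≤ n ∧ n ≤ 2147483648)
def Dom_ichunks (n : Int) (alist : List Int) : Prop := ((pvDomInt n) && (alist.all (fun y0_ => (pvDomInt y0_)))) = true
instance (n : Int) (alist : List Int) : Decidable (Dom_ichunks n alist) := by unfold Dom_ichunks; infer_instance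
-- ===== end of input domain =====

-- B replaces A's stream of trial slices with a short-chunk stop test by the closed-form
-- chunk count len//n and direct slicing (alternative decomposition; same yielded values).
-- The generators' yielded values are collected into a list; A's 'for i in new_list' loop
-- is ported with fuel alist.length + 1, which is exact for n ≥ 1 (at most ⌊len/n⌋ + 1 rounds).

-- ===== PORT A =====
-- list branch of A: trial chunk alist[x:x+n] for x = 0, n, 2n, …; stop on a short chunk
def ichunksGoA (n : Int) (alist : List Int) (x : Int) (fuel : Nat) : List (List Int) :=
  match fuel with
  | 0 => []
  | f + 1 =>
    let i := PySem.List.slice alist (some x) (some (x + n))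
    if (i.length : Int) ≠ n then [] else i :: ichunksGoA n alist (x + n) f

def ichunks (n : Int) (alist : List Int) : List (List Int) :=
  ichunksGoA n alist 0 (alist.length + 1)

-- ===== PORT B =====
-- B: exactly len//n full chunks exist; yield xs[k*n:(k+1)*n] for k in range(len//n)
def ichunks_alt (n : Int) (alist : List Int) : List (List Int) :=
  (PySem.List.pyRange 0 (PySem.Int.floordiv (alist.length : Int) n) 1).map
    (fun k => PySem.List.slice alist (some (k * n)) (some ((k + 1) * n)))

-- ===== PRECONDITION & SPEC =====
-- Pre_ excludes n ≤ 0: for n ≤ -1 A raises ValueError (islice), and for n = 0 A yields [] forever (never returns).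
def Pre_ichunks (n : Int) (alist : List Int) : Prop := 1 ≤ n
instance (n : Int) (alist : List Int) : Decidable (Pre_ichunks n alist) := by unfold Pre_ichunks; infer_instance
def pvWitness_ichunks : Int × List Int := (2, [1, 2, 3, 4, 5])

def Spec_ichunks (n : Int) (alist : List Int) (out : List (List Int)) : Prop := out = ichunks_alt n alist
instance (n : Int) (alist : List Int) (out : List (List Int)) : Decidable (Spec_ichunks n alist out) := by unfold Spec_ichunks; infer_instance

-- ===== CLAIM (what is proved, stated in full; the proofs are below) =====
def Claim_equal_ichunks : Prop := ∀ (n : Int) (alist : List Int), Dom_ichunks n alist → Pre_ichunks n alist → Spec_ichunks n alist (ichunks n alist)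

-- ===== LEMMAS AND PROOFS =====

-- proof-only intermediate: A's absolute-index recursion seen on the remaining suffix
def chunkRec (m : Nat) (it : List Int) (fuel : Nat) : List (List Int) :=
  match fuel with
  | 0 => []
  | f + 1 => if it.length < m then [] else it.take m :: chunkRec m (it.drop m) f

lemma ichunksGoA_eq_chunkRec (n : Int) (hn : 1 ≤ n) (alist : List Int) :
    ∀ (fuel : Nat) (x : Int), 0 ≤ x →
      ichunksGoA n alist x fuel = chunkRec n.toNat (alist.drop x.toNat) fuel := by
  intro fuel
  induction fuel with
  | zero => intro x _; rfl
  | succ f ih =>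
    intro x hx
    have hxn : (0 : Int) ≤ x + n := by omega
    have hslice : PySem.List.slice alist (some x) (some (x + n))
        = (alist.drop x.toNat).take n.toNat := by
      rw [PySem.List.slice_toNat alist hx hxn]
      congr 1
      omega
    have hcond : ((((alist.drop x.toNat).take n.toNat).length : Int) ≠ n)
        ↔ (alist.drop x.toNat).length < n.toNat := by
      simp [List.length_take]
      omega
    simp only [ichunksGoA, chunkRec, hslice]
    by_cases h : (alist.drop x.toNat).length < n.toNat
    · rw [if_pos (hcond.mpr h), if_pos h]
    · rw [if_neg (fun hc => h (hcond.mp hc)), if_neg h, ih (x + n) hxn]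
      have ht : List.drop (x + n).toNat alist
          = List.drop n.toNat (List.drop x.toNat alist) := by
        rw [List.drop_drop]; congr 1; omega
      rw [ht]

lemma chunkRec_eq_map (m : Nat) (hm : 1 ≤ m) :
    ∀ (fuel : Nat) (it : List Int), it.length < fuel →
      chunkRec m it fuel
        = (List.range (it.length / m)).map (fun k => (it.drop (k * m)).take m) := by
  intro fuel
  induction fuel with
  | zero => intro it h; omega
  | succ f ih =>
    intro it hlen
    by_cases h : it.length < m
    · simp [chunkRec, h, Nat.div_eq_of_lt h]
    · have hq : it.length / m = (it.length - m) / m + 1 := by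
        have h1 : it.length = (it.length - m) + m := by omega
        conv_lhs => rw [h1]
        exact Nat.add_div_right _ (by omega)
      have hrec : chunkRec m (it.drop m) f
          = (List.range ((it.length - m) / m)).map
              (fun k => ((it.drop m).drop (k * m)).take m) := by
        rw [ih (it.drop m) (by simp; omega)]
        simp
      simp only [chunkRec, if_neg h, hrec, hq, List.range_succ_eq_map, List.map_cons,
        List.map_map]
      congr 1
      · simp
      · apply List.map_congr_left
        intro k _
        simp only [Function.comp, List.drop_drop]
        congr 2
        rw [Nat.succ_eq_add_one]
        ring
      
theorem ichunks_spec : Claim_equal_ichunks := by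
  intro n alist _ hn
  unfold Pre_ichunks at hn
  unfold Spec_ichunks ichunks ichunks_alt
  have hm : 1 ≤ n.toNat := by omega
  have hA := ichunksGoA_eq_chunkRec n hn alist (alist.length + 1) 0 le_rfl
  rw [hA]
  simp only [Int.toNat_zero, List.drop_zero]
  rw [chunkRec_eq_map n.toNat hm (alist.length + 1) alist (by omega)]
  have hn' : n = ((n.toNat : Nat) : Int) := by omega
  rw [hn', PySem.Int.floordiv_natCast, PySem.List.pyRange_zero_natCast, List.map_map]
  apply List.map_congr_left
  intro k _
  have h1 : ((k : Int) * (n.toNat : Int)) = ((k * n.toNat : Nat) : Int) := by push_cast; ring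
  have h2 : (((k : Int) + 1) * (n.toNat : Int)) = (((k + 1) * n.toNat : Nat) : Int) := by
    push_cast; ring
  simp only [Function.comp, h1, h2]
  rw [PySem.List.slice_toNat alist (Int.natCast_nonneg _) (Int.natCast_nonneg _)]
  simp only [Int.toNat_natCast]
  congr 1
  have : (k + 1) * n.toNat = k * n.toNat + n.toNat := by ring
  omega
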